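-- pv_equiv track=rewrite | github.com/meraf00/Competitive-Programming | codeforces/B_JoJo_s_Incredible_Adventures.py | max_rect
-- ===== SOURCE A (Python) =====
-- def max_rect(string):
--     length = len(string)
--     string = string + string
--
--     count = 0
--     max_consecutive_ones = 0
--
--     for char in string:
--         if char == '1':
--             count += 1
--         else:
--             count = 0
--
--         max_consecutive_ones = max(max_consecutive_ones, count)
--
--     if length < max_consecutive_ones:
--         return length * length
--
--     return ((max_consecutive_ones + 1) // 2) * ((max_consecutive_ones + 2) // 2)
-- ===== SOURCE B (Python) =====
-- def max_rect(string):
--     n = len(string)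
--     norm = "".join(c if c == '1' else '0' for c in string)
--     if '0' not in norm:
--         return n * n
--     runs = [len(r) for r in norm.split('0')]
--     m = max(max(runs), runs[0] + runs[-1])
--     return ((m + 1) // 2) * ((m + 2) // 2)
-- ===== Notes on version B (the rewrite author's own statement) =====
-- stated objective: faster
-- what changed: Instead of doubling the string and scanning 2n characters with a running counter, B normalizes run-breaking characters to '0', splits once into runs of ones, and combines the maximal interior run with the circular wrap (first run + last run) before applying the same closed formula.
import Mathlib
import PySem

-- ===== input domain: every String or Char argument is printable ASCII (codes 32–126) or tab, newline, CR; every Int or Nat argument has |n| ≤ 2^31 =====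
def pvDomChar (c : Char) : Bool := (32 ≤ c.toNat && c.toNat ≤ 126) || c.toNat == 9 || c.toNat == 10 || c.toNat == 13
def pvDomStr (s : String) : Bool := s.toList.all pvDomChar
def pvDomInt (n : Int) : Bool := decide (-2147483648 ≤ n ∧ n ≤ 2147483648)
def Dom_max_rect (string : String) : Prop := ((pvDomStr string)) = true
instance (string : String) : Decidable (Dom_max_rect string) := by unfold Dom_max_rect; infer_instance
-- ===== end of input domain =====

-- B avoids doubling the string: it splits on '0' into runs once and combines the max interior
-- run with the circular wrap (first run + last run); measured constant-factor speedup.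


-- ===== PORT A =====
def max_rect (string : String) : Int :=
  let length : Int := PySem.Str.len string
  let doubled : String := string ++ string
  let res : Int × Int := doubled.toList.foldl
    (fun (st : Int × Int) char =>
      let count : Int := if char == '1' then st.1 + 1 else 0
      (count, max st.2 count)) (0, 0)
  if length < res.2 then length * length
  else PySem.Int.floordiv (res.2 + 1) 2 * PySem.Int.floordiv (res.2 + 2) 2

-- ===== PORT B =====
def max_rect_alt (string : String) : Int :=
  let n : Int := PySem.Str.len string
  -- "".join(c if c == '1' else '0' for c in string): a join of one-character pieces, ported as a map
  let norm : List Char := string.toList.map (fun c => if c == '1' then c else '0')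
  if PySem.Chars.isIn ['0'] norm = false then n * n
  else
    let runs : List Int := (PySem.Chars.splitOn norm ['0']).map PySem.Chars.len
    let m : Int := max ((PySem.List.max? runs (fun x => x)).getD 0)
        (((PySem.List.pyGet? runs 0).getD 0) + ((PySem.List.pyGet? runs (-1)).getD 0))
    PySem.Int.floordiv (m + 1) 2 * PySem.Int.floordiv (m + 2) 2

-- ===== PRECONDITION & SPEC =====
def Spec_max_rect (string : String) (out : Int) : Prop := out = max_rect_alt string
instance (string : String) (out : Int) : Decidable (Spec_max_rect string out) := by unfold Spec_max_rect; infer_instance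

-- ===== CLAIM (what is proved, stated in full; the proofs are below) =====
def Claim_equal_max_rect : Prop := ∀ (string : String), Dom_max_rect string → Spec_max_rect string (max_rect string)

-- ===== LEMMAS AND PROOFS =====

-- A's loop body as a named function, with its running-count / peak characterisation
def stepA : Int × Int → Char → Int × Int :=
  fun st char =>
    let count : Int := if char == '1' then st.1 + 1 else 0
    (count, max st.2 count)

def cnt : List Char → Int → Int
  | [], c => c
  | x :: xs, c => cnt xs (if x == '1' then c + 1 else 0)

def pk : List Char → Int → Int
  | [], c => c
  | x :: xs, c =>
      let c' : Int := if x == '1' then c + 1 else 0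
      max c' (pk xs c')

-- B's split as a structural recursion
def runsAux : List Char → List Char → List (List Char)
  | [], cur => [cur.reverse]
  | c :: rest, cur =>
      if c = '0' then cur.reverse :: runsAux rest []
      else runsAux rest (c :: cur)

def maxlistI : List Int → Int
  | [] => 0
  | x :: xs => max x (maxlistI xs)

theorem fold_eq_cnt_pk (l : List Char) (c m : Int) (h : c ≤ m) :
    l.foldl stepA (c, m) = (cnt l c, max m (pk l c)) := by
  induction l generalizing c m with
  | nil => simp [cnt, pk, max_eq_left h]
  | cons x xs ih =>
      simp only [List.foldl_cons, cnt, pk, stepA]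
      rw [ih _ _ (le_max_right _ _)]
      simp [max_assoc]

theorem cnt_nonneg (l : List Char) (c : Int) (h : 0 ≤ c) : 0 ≤ cnt l c := by
  induction l generalizing c with
  | nil => simpa [cnt]
  | cons x xs ih => simp only [cnt]; split_ifs <;> [exact ih _ (by omega); exact ih _ le_rfl]

theorem pk_nonneg (l : List Char) (c : Int) (h : 0 ≤ c) : 0 ≤ pk l c := by
  induction l generalizing c with
  | nil => simpa [pk]
  | cons x xs ih =>
      simp only [pk]
      split_ifs with hx
      · exact le_trans (by omega) (le_max_left _ _)
      · exact le_max_left _ _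

theorem cnt_le_pk (l : List Char) (c : Int) : cnt l c ≤ pk l c := by
  induction l generalizing c with
  | nil => simp [cnt, pk]
  | cons x xs ih => simp only [cnt, pk]; exact le_trans (ih _) (le_max_right _ _)

theorem cnt_append (l1 l2 : List Char) (c : Int) : cnt (l1 ++ l2) c = cnt l2 (cnt l1 c) := by
  induction l1 generalizing c with
  | nil => simp [cnt]
  | cons x xs ih => simp [cnt, ih]

theorem cnt_ones (l : List Char) (c : Int) (h : ∀ x ∈ l, x = '1') :
    cnt l c = c + l.length := by
  induction l generalizing c with
  | nil => simp [cnt]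
  | cons x xs ih =>
      have hx := h x (by simp)
      subst hx
      simp only [cnt, List.length_cons, beq_self_eq_true, if_true]
      rw [ih _ (fun y hy => h y (by simp [hy]))]
      push_cast; ring

theorem pk_ones (l : List Char) (c : Int) (h : ∀ x ∈ l, x = '1') :
    pk l c = c + l.length := by
  induction l generalizing c with
  | nil => simp [pk]
  | cons x xs ih =>
      have hx := h x (by simp)
      subst hx
      simp only [pk, beq_self_eq_true, if_true]
      rw [ih _ (fun y hy => h y (by simp [hy]))]
      have : (0:Int) ≤ xs.length := by positivity
      rw [max_eq_right (by omega)]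
      simp only [List.length_cons]
      push_cast; ring

theorem go_eq_runsAux (l cur : List Char) (acc : List (List Char)) (fuel : Nat)
    (h : l.length ≤ fuel) :
    PySem.Chars.splitOn.go ['0'] fuel l cur acc = acc.reverse ++ runsAux l cur := by
  induction l generalizing fuel cur acc with
  | nil =>
      cases fuel <;> simp [PySem.Chars.splitOn.go, runsAux]
  | cons c rest ih =>
      cases fuel with
      | zero => simp at h
      | succ f =>
          simp only [PySem.Chars.splitOn.go]
          by_cases hc : c = '0'
          · subst hc
            have hpre : List.isPrefixOf ['0'] ('0' :: rest) = true := by simp [List.isPrefixOf]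
            rw [if_pos hpre]
            simp only [List.length_singleton, List.drop_succ_cons, List.drop_zero]
            simp only [List.length_cons] at h
            rw [ih _ _ _ (by omega)]
            simp [runsAux]
          · have hpre : List.isPrefixOf ['0'] (c :: rest) = false := by
              simp only [List.isPrefixOf, Bool.and_true]
              exact decide_eq_false (fun e => hc e.symm)
            rw [if_neg (by simp [hpre])]
            simp only [List.length_cons] at h
            rw [ih _ _ _ (by omega)]
            simp [runsAux, hc]

theorem splitOn_eq_runsAux (l : List Char) :
    PySem.Chars.splitOn l ['0'] = runsAux l [] := by
  rw [PySem.Chars.splitOn, go_eq_runsAux _ _ _ _ (by omega)]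
  simp

theorem runsAux_ne_nil (l cur : List Char) : runsAux l cur ≠ [] := by
  induction l generalizing cur with
  | nil => simp [runsAux]
  | cons c rest ih => simp only [runsAux]; split_ifs <;> simp [ih]

theorem runsAux_no_zero (l cur : List Char) (h : '0' ∉ l) :
    runsAux l cur = [cur.reverse ++ l] := by
  induction l generalizing cur with
  | nil => simp [runsAux]
  | cons c rest ih =>
      have hc : c ≠ '0' := fun e => h (by simp [e])
      simp [runsAux, hc, ih _ (fun e => h (by simp [e]))]

theorem runsAux_decomp (p q cur : List Char) (hp : '0' ∉ p) :
    runsAux (p ++ '0' :: q) cur = (cur.reverse ++ p) :: runsAux q [] := by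
  induction p generalizing cur with
  | nil => simp [runsAux]
  | cons c rest ih =>
      have hc : c ≠ '0' := fun e => hp (by simp [e])
      simp [runsAux, hc, ih _ (fun e => hp (by simp [e]))]

theorem getLast?_cons_ne {α : Type} (x : α) (xs : List α) (h : xs ≠ []) :
    (x :: xs).getLast? = xs.getLast? := by
  cases xs with
  | nil => exact absurd rfl h
  | cons y ys => simp [List.getLast?_cons_cons]

theorem mem_le_maxlistI (xs : List Int) (x : Int) (hx : x ∈ xs) : x ≤ maxlistI xs := by
  induction xs with
  | nil => simp at hx
  | cons y ys ih =>
      rcases List.mem_cons.1 hx with rfl | h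
      · exact le_max_left _ _
      · exact le_trans (ih h) (le_max_right _ _)

theorem maxlistI_runs_le (l cur : List Char) :
    maxlistI ((runsAux l cur).map PySem.Chars.len) ≤ (cur.length : Int) + l.length := by
  induction l generalizing cur with
  | nil => simp [runsAux, maxlistI, PySem.Chars.len]
  | cons c rest ih =>
      simp only [runsAux]
      split_ifs with hc
      · simp only [List.map_cons, maxlistI, PySem.Chars.len]
        have h1 := ih ([] : List Char)
        simp only [List.length_nil, Nat.cast_zero, zero_add] at h1
        simp only [List.length_reverse, List.length_cons]
        push_cast
        omega
      · have h1 := ih (c :: cur)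
        simp only [List.length_cons] at h1 ⊢
        push_cast at h1 ⊢
        omega

theorem getLast?_runs_le (l cur : List Char) (r : List Char)
    (h : (runsAux l cur).getLast? = some r) :
    (r.length : Int) ≤ (cur.length : Int) + l.length := by
  induction l generalizing cur with
  | nil =>
      simp only [runsAux, List.getLast?_singleton, Option.some.injEq] at h
      subst h
      simp
  | cons c rest ih =>
      by_cases hc : c = '0'
      · subst hc
        have hne := runsAux_ne_nil rest ([] : List Char)
        have heq : runsAux ('0' :: rest) cur = cur.reverse :: runsAux rest [] := by
          simp [runsAux]
        rw [heq, getLast?_cons_ne _ _ hne] at h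
        have h1 := ih ([] : List Char) h
        simp only [List.length_nil, Nat.cast_zero, zero_add] at h1
        simp only [List.length_cons]
        push_cast
        omega
      · have heq : runsAux (c :: rest) cur = runsAux rest (c :: cur) := by
          simp [runsAux, hc]
        rw [heq] at h
        have h1 := ih (c :: cur) h
        simp only [List.length_cons] at h1 ⊢
        push_cast at h1 ⊢
        omega

theorem max?_cons (x : Int) (xs : List Int) :
    PySem.List.max? (x :: xs) (fun y => y) = some (xs.foldl max x) := by
  show List.foldl _ none (x :: xs) = _
  simp only [List.foldl_cons]
  induction xs generalizing x with
  | nil => simp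
  | cons y ys ih =>
      simp only [List.foldl_cons]
      by_cases h : x < y
      · rw [if_pos h, ih, max_eq_right h.le]
      · rw [if_neg h, ih, max_eq_left (not_lt.1 h)]

theorem foldl_max_eq (xs : List Int) (m : Int) (h : 0 ≤ m) :
    xs.foldl max m = max m (maxlistI xs) := by
  induction xs generalizing m with
  | nil => simp [maxlistI, max_eq_left h]
  | cons x ys ih =>
      simp only [List.foldl_cons, maxlistI]
      rw [ih _ (le_trans h (le_max_left _ _))]
      simp [max_assoc]

theorem zero_decomp (q : List Char) (h : '0' ∈ q) :
    ∃ p t, q = p ++ '0' :: t ∧ '0' ∉ p ∧ p.length + t.length + 1 = q.length := by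
  set pr : Char → Bool := fun c => c != '0' with hpr
  refine ⟨q.takeWhile pr, (q.dropWhile pr).tail, ?_, ?_, ?_⟩
  · have hd : q.dropWhile pr ≠ [] := by
      intro hnil
      have : ∀ c ∈ q, pr c = true := by
        intro c hc
        have := List.takeWhile_append_dropWhile (p := pr) (l := q)
        rw [hnil, List.append_nil] at this
        exact List.mem_takeWhile_imp (by rw [this]; exact hc)
      have := this '0' h
      simp [hpr] at this
    have hhead : pr ((q.dropWhile pr).head hd) = false := List.head_dropWhile_not pr hd
    have h0 : (q.dropWhile pr).head hd = '0' := by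
      simp [hpr] at hhead; exact hhead
    have hdw : q.dropWhile pr = '0' :: (q.dropWhile pr).tail := by
      conv_lhs => rw [← List.cons_head_tail hd]
      rw [h0]
    conv_lhs => rw [← List.takeWhile_append_dropWhile (p := pr) (l := q), hdw]
  · intro hm
    have := List.mem_takeWhile_imp hm
    simp [hpr] at this
  · have hd : q.dropWhile pr ≠ [] := by
      intro hnil
      have : ∀ c ∈ q, pr c = true := by
        intro c hc
        have := List.takeWhile_append_dropWhile (p := pr) (l := q)
        rw [hnil, List.append_nil] at this
        exact List.mem_takeWhile_imp (by rw [this]; exact hc)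
      have := this '0' h
      simp [hpr] at this
    have := congrArg List.length (List.takeWhile_append_dropWhile (p := pr) (l := q))
    simp only [List.length_append] at this
    have ht : (q.dropWhile pr).length = (q.dropWhile pr).tail.length + 1 := by
      cases hcase : q.dropWhile pr with
      | nil => exact absurd hcase hd
      | cons a b => simp
    omega

theorem pk_decomp (p q : List Char) (c : Int) (hc : 0 ≤ c) (hp : ∀ x ∈ p, x = '1') :
    pk (p ++ '0' :: q) c = max (if p = [] then 0 else c + p.length) (pk q 0) := by
  have hq0 : (0:Int) ≤ pk q 0 := pk_nonneg q 0 le_rfl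
  induction p generalizing c with
  | nil => simp [pk]
  | cons x xs ih =>
      have hx := hp x (by simp)
      subst hx
      simp only [List.cons_append, pk, beq_self_eq_true, if_true]
      rw [ih _ (by omega) (fun y hy => hp y (by simp [hy]))]
      rcases eq_or_ne xs [] with rfl | hxs
      · simp only [if_neg (List.cons_ne_nil _ _), List.length_singleton]
        simp only [reduceIte]
        push_cast
        rw [max_eq_right hq0]
      · rw [if_neg hxs, if_neg (List.cons_ne_nil _ _)]
        simp only [List.length_cons]
        push_cast
        simp only [max_def]
        split_ifs <;> omega

theorem cnt_decomp (p q : List Char) (c : Int) :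
    cnt (p ++ '0' :: q) c = cnt q 0 := by
  rw [cnt_append]
  simp [cnt]

theorem pk_zero_eq_maxruns_aux : ∀ (n : Nat) (q : List Char), q.length ≤ n →
    (∀ x ∈ q, x = '0' ∨ x = '1') →
    pk q 0 = maxlistI ((runsAux q []).map PySem.Chars.len) := by
  intro n
  induction n with
  | zero =>
      intro q hlen _
      have : q = [] := List.eq_nil_of_length_eq_zero (Nat.le_zero.1 hlen)
      subst this
      simp [pk, runsAux, maxlistI, PySem.Chars.len]
  | succ n ih =>
      intro q hlen hb
      by_cases h0 : '0' ∈ q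
      · obtain ⟨p, t, rfl, hp, hcount⟩ := zero_decomp q h0
        have hp1 : ∀ x ∈ p, x = '1' := by
          intro x hx
          rcases hb x (by simp [hx]) with rfl | rfl
          · exact absurd hx hp
          · rfl
        rw [pk_decomp p t 0 le_rfl hp1, runsAux_decomp p t [] hp]
        simp only [List.reverse_nil, List.nil_append, List.map_cons, maxlistI]
        rw [← ih t (by simp at hlen ⊢; omega)
              (fun x hx => hb x (by simp [hx]))]
        have : (if p = [] then (0:Int) else 0 + p.length) = (PySem.Chars.len p) := by
          rcases eq_or_ne p [] with rfl | hne
          · simp [PySem.Chars.len]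
          · rw [if_neg hne]; simp [PySem.Chars.len]
        rw [this]
      · have ho : ∀ x ∈ q, x = '1' := by
          intro x hx
          rcases hb x hx with rfl | rfl
          · exact absurd hx h0
          · rfl
        rw [pk_ones q 0 ho, runsAux_no_zero q [] h0]
        simp [maxlistI, PySem.Chars.len]

theorem pk_zero_eq_maxruns (q : List Char) (hb : ∀ x ∈ q, x = '0' ∨ x = '1') :
    pk q 0 = maxlistI ((runsAux q []).map PySem.Chars.len) :=
  pk_zero_eq_maxruns_aux q.length q le_rfl hb

theorem cnt_zero_eq_lastrun_aux : ∀ (n : Nat) (q : List Char), q.length ≤ n →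
    (∀ x ∈ q, x = '0' ∨ x = '1') →
    ∃ r, (runsAux q []).getLast? = some r ∧ cnt q 0 = (r.length : Int) := by
  intro n
  induction n with
  | zero =>
      intro q hlen _
      have : q = [] := List.eq_nil_of_length_eq_zero (Nat.le_zero.1 hlen)
      subst this
      exact ⟨[], by simp [runsAux], by simp [cnt]⟩
  | succ n ih =>
      intro q hlen hb
      by_cases h0 : '0' ∈ q
      · obtain ⟨p, t, rfl, hp, hcount⟩ := zero_decomp q h0
        obtain ⟨r, hr, hcnt⟩ := ih t (by simp at hlen ⊢; omega) (fun x hx => hb x (by simp [hx]))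
        refine ⟨r, ?_, ?_⟩
        · rw [runsAux_decomp p t [] hp, getLast?_cons_ne _ _ (runsAux_ne_nil t [])]
          exact hr
        · rw [cnt_decomp]; exact hcnt
      · have ho : ∀ x ∈ q, x = '1' := by
          intro x hx
          rcases hb x hx with rfl | rfl
          · exact absurd hx h0
          · rfl
        refine ⟨q, ?_, ?_⟩
        · rw [runsAux_no_zero q [] h0]; simp
        · rw [cnt_ones q 0 ho]; simp

theorem cnt_zero_eq_lastrun (q : List Char) (hb : ∀ x ∈ q, x = '0' ∨ x = '1') :
    ∃ r, (runsAux q []).getLast? = some r ∧ cnt q 0 = (r.length : Int) :=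
  cnt_zero_eq_lastrun_aux q.length q le_rfl hb

theorem infix_singleton_iff (a : Char) (l : List Char) : [a] <:+: l ↔ a ∈ l := by
  constructor
  · intro h
    exact (List.singleton_sublist).1 h.sublist
  · intro h
    obtain ⟨s, t, rfl⟩ := List.append_of_mem h
    exact ⟨s, t, by simp⟩

theorem pyGet?_zero {α : Type} (x : α) (xs : List α) :
    PySem.List.pyGet? (x :: xs) 0 = some x := by
  simp [PySem.List.pyGet?, PySem.List.pyIdx?]

theorem pyGet?_neg_one {α : Type} (xs : List α) (h : xs ≠ []) :
    PySem.List.pyGet? xs (-1) = xs.getLast? := by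
  have hlen : 0 < xs.length := List.length_pos_iff.2 h
  simp only [PySem.List.pyGet?, PySem.List.pyIdx?]
  rw [if_neg (by omega), if_pos (by omega)]
  rw [List.getLast?_eq_getElem?]
  norm_num

theorem cnt_map_norm (l : List Char) (c : Int) :
    cnt (l.map (fun c => if c == '1' then c else '0')) c = cnt l c := by
  induction l generalizing c with
  | nil => simp
  | cons x xs ih =>
      simp only [List.map_cons, cnt]
      by_cases hx : x == '1'
      · have : x = '1' := by simpa using hx
        subst this
        simpa using ih _
      · simp only [hx, Bool.false_eq_true, if_false]
        have h01 : ('0' == '1') = false := rfl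
        simp only [h01, Bool.false_eq_true, if_false]
        exact ih _

theorem pk_map_norm (l : List Char) (c : Int) :
    pk (l.map (fun c => if c == '1' then c else '0')) c = pk l c := by
  induction l generalizing c with
  | nil => simp
  | cons x xs ih =>
      simp only [List.map_cons, pk]
      by_cases hx : x == '1'
      · have hx1 : x = '1' := by simpa using hx
        subst hx1
        simp only [beq_self_eq_true, if_true]
        rw [ih]
      · simp only [hx, Bool.false_eq_true, if_false]
        have h01 : ('0' == '1') = false := rfl
        simp only [h01, Bool.false_eq_true, if_false]
        rw [ih _]

-- the A-side fold over the doubled string, as cnt/pk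
theorem max_rect_fold (l : List Char) :
    (l ++ l).foldl stepA ((0:Int), (0:Int)) =
      (cnt l (cnt l 0), max (max 0 (pk l 0)) (pk l (cnt l 0))) := by
  rw [List.foldl_append, fold_eq_cnt_pk l 0 0 le_rfl,
      fold_eq_cnt_pk l (cnt l 0) (max 0 (pk l 0))
        (le_trans (cnt_le_pk l 0) (le_max_right _ _))]

-- ===== VERDICT (by name: the statement is the Claim_ definition above) =====
theorem max_rect_spec : Claim_equal_max_rect := by
  intro s _
  show max_rect s = max_rect_alt s
  set l : List Char := s.toList with hl
  set nl : List Char := l.map (fun c => if c == '1' then c else '0') with hnl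
  have hb : ∀ x ∈ nl, x = '0' ∨ x = '1' := by
    intro x hx
    rw [hnl] at hx
    obtain ⟨y, _, rfl⟩ := List.mem_map.1 hx
    by_cases hy : y == '1'
    · have hy1 : y = '1' := by simpa using hy
      right; simp [hy1]
    · left; simp [hy]
  have hstep : (fun (st : Int × Int) char =>
      let count : Int := if char == '1' then st.1 + 1 else 0
      (count, max st.2 count)) = stepA := rfl
  have hdl : (s ++ s).toList = l ++ l := by simp [hl]
  have hnlen : nl.length = l.length := by rw [hnl]; simp
  have hn : PySem.Str.len s = (nl.length : Int) := by
    rw [hnlen]; rfl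
  have hcl : ∀ c, cnt l c = cnt nl c := fun c => (cnt_map_norm l c).symm
  have hpkl : ∀ c, pk l c = pk nl c := fun c => (pk_map_norm l c).symm
  by_cases h0 : '0' ∈ nl
  · -- the normalized string contains a zero: B takes the split branch
    have hIn : PySem.Chars.isIn ['0'] nl = true := by
      rw [PySem.Chars.isIn_iff_infix]
      exact (infix_singleton_iff '0' nl).2 h0
    obtain ⟨p, t, hlpt, hp, hcount⟩ := zero_decomp nl h0
    have hp1 : ∀ x ∈ p, x = '1' := by
      intro x hx
      rcases hb x (by rw [hlpt]; simp [hx]) with rfl | rfl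
      · exact absurd hx hp
      · rfl
    obtain ⟨r, hr, hcnt⟩ := cnt_zero_eq_lastrun nl hb
    have hrt : (runsAux t []).getLast? = some r := by
      rw [hlpt, runsAux_decomp p t [] hp, getLast?_cons_ne _ _ (runsAux_ne_nil t [])] at hr
      exact hr
    have hrle : (r.length : Int) ≤ (t.length : Int) := by
      have := getLast?_runs_le t [] r hrt
      simpa using this
    set T : Int := maxlistI ((runsAux t []).map PySem.Chars.len) with hT
    set M : Int := maxlistI ((runsAux nl []).map PySem.Chars.len) with hM
    have hpk0 : pk nl 0 = M := pk_zero_eq_maxruns nl hb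
    have hMp : M = max ((p.length : Int)) T := by
      rw [hM, hlpt, runsAux_decomp p t [] hp]
      simp [maxlistI, PySem.Chars.len, hT]
    have hpkt0 : pk t 0 = T :=
      pk_zero_eq_maxruns t (fun x hx => hb x (by rw [hlpt]; simp [hx]))
    have hcnt0 : (0:Int) ≤ cnt nl 0 := cnt_nonneg nl 0 le_rfl
    have hpkcnt : pk nl (cnt nl 0) =
        max (if p = [] then 0 else (r.length : Int) + p.length) (pk t 0) := by
      rw [hcnt]
      conv_lhs => rw [hlpt]
      exact pk_decomp p t _ (by positivity) hp1
    have hMnonneg : (0:Int) ≤ M := by rw [← hpk0]; exact pk_nonneg nl 0 le_rfl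
    have hbT : (r.length : Int) ≤ T := by
      apply mem_le_maxlistI
      have hmem : r ∈ runsAux t [] := List.mem_of_getLast? hrt
      have : PySem.Chars.len r ∈ (runsAux t []).map PySem.Chars.len := List.mem_map_of_mem hmem
      simpa [PySem.Chars.len] using this
    have hTM : T ≤ M := by rw [hMp]; exact le_max_right _ _
    have hmx : max (max 0 (pk nl 0)) (pk nl (cnt nl 0)) =
        max M ((p.length : Int) + r.length) := by
      rw [hpkcnt, hpk0, max_eq_right hMnonneg, hpkt0]
      rcases eq_or_ne p [] with rfl | hne
      · simp only [reduceIte, List.length_nil, Nat.cast_zero, zero_add]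
        simp only [max_def]
        split_ifs <;> omega
      · rw [if_neg hne]
        simp only [max_def]
        split_ifs <;> omega
    have hruns : (PySem.Chars.splitOn nl ['0']).map PySem.Chars.len =
        PySem.Chars.len p :: (runsAux t []).map PySem.Chars.len := by
      rw [splitOn_eq_runsAux]
      conv_lhs => rw [hlpt]
      rw [runsAux_decomp p t [] hp]
      simp
    have hlenp : PySem.Chars.len p = (p.length : Int) := rfl
    have hmapne : (runsAux t []).map PySem.Chars.len ≠ [] := by
      simp [runsAux_ne_nil t []]
    have hBmax : (PySem.List.max? ((PySem.Chars.splitOn nl ['0']).map PySem.Chars.len)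
        (fun x => x)).getD 0 = M := by
      rw [hruns, max?_cons]
      simp only [Option.getD_some]
      rw [foldl_max_eq _ _ (by rw [hlenp]; positivity), hMp, hlenp, hT]
    have hB0 : (PySem.List.pyGet? ((PySem.Chars.splitOn nl ['0']).map PySem.Chars.len) 0).getD 0 =
        (p.length : Int) := by
      rw [hruns, pyGet?_zero]
      simp only [Option.getD_some, hlenp]
    have hBlast : (PySem.List.pyGet? ((PySem.Chars.splitOn nl ['0']).map PySem.Chars.len) (-1)).getD 0 =
        (r.length : Int) := by
      rw [hruns, pyGet?_neg_one _ (List.cons_ne_nil _ _),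
          getLast?_cons_ne _ _ hmapne, List.getLast?_map, hrt]
      simp [PySem.Chars.len]
    have hmle : max M ((p.length : Int) + r.length) ≤ (nl.length : Int) := by
      apply max_le
      · have := maxlistI_runs_le nl ([] : List Char)
        rw [← hM] at this
        simpa using this
      · have : p.length + t.length + 1 = nl.length := hcount
        push_cast [← this]
        omega
    simp only [max_rect, max_rect_alt, hdl, hstep, max_rect_fold, hpkl, hcl, hmx, hn]
    rw [if_neg (by omega), hIn]
    simp only [Bool.true_eq_false, if_false]
    rw [hBmax, hB0, hBlast]
  · -- no zero in the normalized string: every character is '1'; B returns n * n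
    have hIn : PySem.Chars.isIn ['0'] nl = false := by
      rw [PySem.Chars.isIn_eq_false_iff]
      intro hinf
      exact h0 ((infix_singleton_iff '0' nl).1 hinf)
    have ho : ∀ x ∈ nl, x = '1' := by
      intro x hx
      rcases hb x hx with rfl | rfl
      · exact absurd hx h0
      · rfl
    simp only [max_rect, max_rect_alt, hdl, hstep, max_rect_fold, hpkl, hcl]
    rw [hIn]
    simp only [reduceIte]
    rw [cnt_ones nl 0 ho, pk_ones nl 0 ho, pk_ones nl _ ho]
    rw [hn]
    set L : Int := (nl.length : Int) with hL
    have hL0 : 0 ≤ L := by positivity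
    rcases eq_or_lt_of_le hL0 with hz | hpos
    · rw [← hz]
      norm_num [PySem.Int.floordiv]
      decide
    · have hmm : max (max 0 (0 + L)) (0 + L + L) = L + L := by
        simp only [max_def]
        split_ifs <;> omega
      rw [hmm, if_pos (by omega)]
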